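-- pv_equiv track=rewrite | github.com/soroushfathi/DataStructure-Algorithm | DP/klienberg10.py | max2machines
-- ===== SOURCE A (Python) =====
-- def max2machines(A, B):
--     A = [0, *A]
--     B = [0, *B]
--     assert len(A) == len(B)
--     n = len(A)
--     res = [
--         [0, A[1]],
--         [0, B[1]],
--     ]
--     for i in range(2, n):
--         res[0].append(A[i] + max(res[0][i-1], res[1][i-2]))
--         res[1].append(B[i] + max(res[1][i-1], res[0][i-2]))
--
--     return res
-- ===== SOURCE B (Python) =====
-- def max2machines(A, B):
--     valA = [0, *A]
--     valB = [0, *B]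
--     assert len(valA) == len(valB)
--     n = len(valA)
--     memo = {}
--
--     def f(m, i):
--         # best finish time on machine m after the first i jobs (top-down recurrence)
--         if (m, i) not in memo:
--             if i == 0:
--                 memo[(m, i)] = 0
--             elif i == 1:
--                 memo[(m, i)] = valA[1] if m == 0 else valB[1]
--             else:
--                 v = valA[i] if m == 0 else valB[i]
--                 memo[(m, i)] = v + max(f(m, i - 1), f(1 - m, i - 2))
--         return memo[(m, i)]
--
--     res0, res1 = [], []
--     for i in range(n):
--         res0.append(f(0, i))
--         res1.append(f(1, i))
--     return [res0, res1]
-- ===== Notes on version B (the rewrite author's own statement) =====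
-- stated objective: alternative
-- what changed: Replaces the forward loop that appends into the shared res[0]/res[1] table (reading back via explicit indices, including the freshly-extended row) with a top-down memoized recursion f(machine,i) on the recurrence itself, the two rows then collected by evaluating f ascending.
import Mathlib
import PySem

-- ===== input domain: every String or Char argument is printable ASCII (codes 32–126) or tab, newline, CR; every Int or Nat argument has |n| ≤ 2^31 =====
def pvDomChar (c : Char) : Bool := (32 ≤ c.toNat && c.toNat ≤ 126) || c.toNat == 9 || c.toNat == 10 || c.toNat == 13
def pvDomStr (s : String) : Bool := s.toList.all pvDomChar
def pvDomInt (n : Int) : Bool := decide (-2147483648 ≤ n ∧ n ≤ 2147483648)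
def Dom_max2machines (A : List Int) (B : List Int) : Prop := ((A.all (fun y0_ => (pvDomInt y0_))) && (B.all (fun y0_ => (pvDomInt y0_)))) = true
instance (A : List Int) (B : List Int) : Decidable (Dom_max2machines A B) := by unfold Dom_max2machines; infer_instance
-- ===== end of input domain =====

-- B replaces A's forward append loop over a shared 2-row table by a top-down memoized
-- recursion on the recurrence (the memo is pure caching, ported as plain recursion);
-- return value only, neither version mutates its arguments.

-- ===== PORT A =====
-- one loop iteration of A: append to row 0, then append to row 1 (reading the already
-- extended row 0 at i-2, exactly as the Python does)
def pvStepA (vA vB : List Int) (r : List Int × List Int) (i : Nat) : List Int × List Int :=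
  let r0 := r.1 ++ [vA.getD i 0 + max (r.1.getD (i - 1) 0) (r.2.getD (i - 2) 0)]
  let r1 := r.2 ++ [vB.getD i 0 + max (r.2.getD (i - 1) 0) (r0.getD (i - 2) 0)]
  (r0, r1)

def max2machines (A : List Int) (B : List Int) : List (List Int) :=
  let vA := 0 :: A          -- A = [0, *A]
  let vB := 0 :: B          -- B = [0, *B]
  let n := vA.length        -- assert len == len, n = len(A): Pre_ guarantees this
  -- res = [[0, A[1]], [0, B[1]]]; indexing at 1 is valid under Pre_ (A ≠ [])
  let res := (List.range' 2 (n - 2)).foldl (pvStepA vA vB) ([0, vA.getD 1 0], [0, vB.getD 1 0])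
  [res.1, res.2]

-- ===== PORT B =====
-- f(0,i) / f(1,i) of Source B (the memo dict is pure caching of this recursion)
mutual
def pvFA (vA vB : List Int) : Nat → Int
  | 0 => 0
  | 1 => vA.getD 1 0
  | i + 2 => vA.getD (i + 2) 0 + max (pvFA vA vB (i + 1)) (pvFB vA vB i)
def pvFB (vA vB : List Int) : Nat → Int
  | 0 => 0
  | 1 => vB.getD 1 0
  | i + 2 => vB.getD (i + 2) 0 + max (pvFB vA vB (i + 1)) (pvFA vA vB i)
end

def max2machines_alt (A : List Int) (B : List Int) : List (List Int) :=
  let vA := 0 :: A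
  let vB := 0 :: B
  let n := vA.length
  -- the fill loop appends f(0,i) and f(1,i) for i ascending
  [(List.range n).map (pvFA vA vB), (List.range n).map (pvFB vA vB)]

-- ===== PRECONDITION & SPEC =====
-- Pre_ excludes exactly the inputs on which A raises: unequal lengths (AssertionError)
-- and the empty list (IndexError at A[1]).
def Pre_max2machines (A : List Int) (B : List Int) : Prop := A.length = B.length ∧ A ≠ []
instance (A : List Int) (B : List Int) : Decidable (Pre_max2machines A B) := by unfold Pre_max2machines; infer_instance
def pvWitness_max2machines : List Int × List Int := ([3, 1], [2, 4])

def Spec_max2machines (A : List Int) (B : List Int) (out : List (List Int)) : Prop := out = max2machines_alt A B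
instance (A : List Int) (B : List Int) (out : List (List Int)) : Decidable (Spec_max2machines A B out) := by unfold Spec_max2machines; infer_instance

-- ===== CLAIM (what is proved, stated in full; the proofs are below) =====
def Claim_equal_max2machines : Prop := ∀ (A : List Int) (B : List Int), Dom_max2machines A B → Pre_max2machines A B → Spec_max2machines A B (max2machines A B)

-- ===== LEMMAS AND PROOFS =====

lemma getD_map_range (f : Nat → Int) (i k : Nat) (h : k < i) :
    ((List.range i).map f).getD k 0 = f k := by
  simp [List.getD_eq_getElem?_getD, h]

lemma loop_inv (vA vB : List Int) (k : Nat) : ∀ (i : Nat), 2 ≤ i →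
    (List.range' i k).foldl (pvStepA vA vB)
      ((List.range i).map (pvFA vA vB), (List.range i).map (pvFB vA vB))
    = ((List.range (i + k)).map (pvFA vA vB), (List.range (i + k)).map (pvFB vA vB)) := by
  induction k with
  | zero => intro i _; simp
  | succ k ih =>
    intro i hi
    obtain ⟨j, rfl⟩ : ∃ j, i = j + 2 := ⟨i - 2, by omega⟩
    rw [List.range'_succ, List.foldl_cons]
    have hstep : pvStepA vA vB
        ((List.range (j + 2)).map (pvFA vA vB), (List.range (j + 2)).map (pvFB vA vB)) (j + 2)
        = ((List.range (j + 3)).map (pvFA vA vB), (List.range (j + 3)).map (pvFB vA vB)) := by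
      have h0 : ((List.range (j + 2)).map (pvFA vA vB)).getD (j + 1) 0 = pvFA vA vB (j + 1) :=
        getD_map_range _ _ _ (by omega)
      have h1 : ((List.range (j + 2)).map (pvFB vA vB)).getD j 0 = pvFB vA vB j :=
        getD_map_range _ _ _ (by omega)
      have h2 : ((List.range (j + 2)).map (pvFB vA vB)).getD (j + 1) 0 = pvFB vA vB (j + 1) :=
        getD_map_range _ _ _ (by omega)
      have h3 : ((List.range (j + 3)).map (pvFA vA vB)).getD j 0 = pvFA vA vB j :=
        getD_map_range _ _ _ (by omega)
      have e0 : (List.range (j + 2)).map (pvFA vA vB) ++ [pvFA vA vB (j + 2)]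
          = (List.range (j + 3)).map (pvFA vA vB) := by
        rw [List.range_succ (n := j + 2)]; simp
      have e1 : (List.range (j + 2)).map (pvFB vA vB) ++ [pvFB vA vB (j + 2)]
          = (List.range (j + 3)).map (pvFB vA vB) := by
        rw [List.range_succ (n := j + 2)]; simp
      show (_, _) = (_, _)
      have ha : j + 2 - 1 = j + 1 := by omega
      have hb : j + 2 - 2 = j := by omega
      rw [ha, hb, h0, h1]
      rw [show pvFA vA vB (j + 2) = vA.getD (j + 2) 0 + max (pvFA vA vB (j + 1)) (pvFB vA vB j) from rfl] at e0
      rw [e0, h2, h3]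
      rw [show pvFB vA vB (j + 2) = vB.getD (j + 2) 0 + max (pvFB vA vB (j + 1)) (pvFA vA vB j) from rfl] at e1
      rw [e1]
    rw [hstep, ih (j + 3) (by omega), show j + 3 + k = j + 2 + (k + 1) from by omega]

-- ===== VERDICT (by name: the statement is the Claim_ definition above) =====
theorem max2machines_spec : Claim_equal_max2machines := by
  intro A B _ hpre
  obtain ⟨hlen, hne⟩ := hpre
  unfold Spec_max2machines max2machines max2machines_alt
  obtain ⟨a, A', rfl⟩ : ∃ a A', A = a :: A' := by
    cases A with | nil => exact absurd rfl hne | cons a t => exact ⟨a, t, rfl⟩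
  have hinit0 : ([0, (0 :: a :: A').getD 1 0] : List Int)
      = (List.range 2).map (pvFA (0 :: a :: A') (0 :: B)) := by
    simp [List.range_succ, pvFA]
  have hinit1 : ([0, (0 :: B).getD 1 0] : List Int)
      = (List.range 2).map (pvFB (0 :: a :: A') (0 :: B)) := by
    simp [List.range_succ, pvFB]
  simp only []
  rw [hinit0, hinit1, loop_inv _ _ _ 2 (le_refl 2)]
  have : 2 + ((0 :: a :: A').length - 2) = (0 :: a :: A').length := by
    simp; omega
  rw [this]
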